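-- pv_equiv track=rewrite | github.com/Jame-Artifact-Zero/artifact-zero-gateway | f500_scraper.py | detect_downstream_before_constraint
-- ===== SOURCE A (Python) =====
-- DOWNSTREAM_CAPABILITY_MARKERS = [
--     "we can build", "we can add", "just add", "ship it", "deploy it", "we can do all of it",
--     "just use", "easy to", "quick fix", "we can implement"
-- ]
--
-- def detect_downstream_before_constraint(prompt, answer, l0):
--     if not l0: return False
--     a = (answer or "").lower()
--     first_cap = -1
--     for m in DOWNSTREAM_CAPABILITY_MARKERS:
--         idx = a.find(m)
--         if idx != -1 and (first_cap == -1 or idx < first_cap):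
--             first_cap = idx
--     if first_cap == -1: return False
--     first_con = -1
--     for m in l0:
--         idx = a.find(m.lower())
--         if idx != -1 and (first_con == -1 or idx < first_con):
--             first_con = idx
--     if first_con == -1: return True
--     return first_cap < first_con
-- ===== SOURCE B (Python) =====
-- DOWNSTREAM_CAPABILITY_MARKERS = [
--     "we can build", "we can add", "just add", "ship it", "deploy it", "we can do all of it",
--     "just use", "easy to", "quick fix", "we can implement"
-- ]
--
-- def detect_downstream_before_constraint(prompt, answer, l0):
--     # Single left-to-right scan over positions: the first position where any
--     # marker starts decides the answer (constraint checked first, so a tie at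
--     # the same position counts as constraint-first, matching "strictly before").
--     if not l0:
--         return False
--     a = (answer or "").lower()
--     cons = [m.lower() for m in l0]
--     for i in range(len(a) + 1):
--         if any(a.startswith(m, i) for m in cons):
--             return False
--         if any(a.startswith(m, i) for m in DOWNSTREAM_CAPABILITY_MARKERS):
--             return True
--     return False
-- ===== Notes on version B (the rewrite author's own statement) =====
-- stated objective: alternative
-- what changed: Replaces the two per-marker find()-and-keep-minimum loops with a single left-to-right scan over answer positions that tests at each position whether a constraint or capability marker starts there (constraint first, so ties resolve to False exactly as A's strict '<').
import Mathlib
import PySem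

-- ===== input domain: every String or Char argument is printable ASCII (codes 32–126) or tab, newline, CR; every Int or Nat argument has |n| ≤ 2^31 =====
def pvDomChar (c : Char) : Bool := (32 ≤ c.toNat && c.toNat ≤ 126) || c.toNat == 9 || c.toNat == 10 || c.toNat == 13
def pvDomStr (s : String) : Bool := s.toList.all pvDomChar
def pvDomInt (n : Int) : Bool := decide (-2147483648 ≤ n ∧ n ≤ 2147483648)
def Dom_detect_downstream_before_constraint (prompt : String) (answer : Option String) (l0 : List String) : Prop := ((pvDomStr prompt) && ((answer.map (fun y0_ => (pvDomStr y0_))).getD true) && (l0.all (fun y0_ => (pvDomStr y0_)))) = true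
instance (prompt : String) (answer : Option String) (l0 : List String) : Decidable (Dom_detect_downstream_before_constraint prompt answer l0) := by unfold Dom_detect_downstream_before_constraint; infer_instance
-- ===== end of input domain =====

-- B replaces A's two find()-and-keep-minimum loops by one left-to-right scan over
-- positions of the answer (objective: alternative, same cost; return value only).

-- ===== PORT A =====
def DOWNSTREAM_CAPABILITY_MARKERS : List String := [
    "we can build", "we can add", "just add", "ship it", "deploy it", "we can do all of it",
    "just use", "easy to", "quick fix", "we can implement"]

-- Python's `if idx != -1 and (first == -1 or idx < first): first = idx`, shared by both of A's loops
def pvKeepMin (first idx : Int) : Int :=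
  if idx != -1 && (first == -1 || idx < first) then idx else first

def detect_downstream_before_constraint (prompt : String) (answer : Option String) (l0 : List String) : Bool :=
  if l0 = [] then false else
  let a := PySem.Chars.lower (answer.getD "").toList
  let first_cap := DOWNSTREAM_CAPABILITY_MARKERS.foldl
      (fun first m => pvKeepMin first (PySem.Chars.find a m.toList)) (-1)
  if first_cap = -1 then false else
  let first_con := l0.foldl
      (fun first m => pvKeepMin first (PySem.Chars.find a (PySem.Chars.lower m.toList))) (-1)
  if first_con = -1 then true else decide (first_cap < first_con)

-- ===== PORT B =====
-- Python's a.startswith(m, i) for 0 ≤ i: m is a prefix of a[i:]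
def pvStartsAt (a m : List Char) (i : Nat) : Bool := m.isPrefixOf (a.drop i)

-- the `for i in range(...)` loop of Source B, over the remaining positions
def pvScan (a : List Char) (cons caps : List (List Char)) : List Nat → Bool
  | [] => false
  | i :: rest =>
    if cons.any (fun m => pvStartsAt a m i) then false
    else if caps.any (fun m => pvStartsAt a m i) then true
    else pvScan a cons caps rest

def detect_downstream_before_constraint_alt (prompt : String) (answer : Option String) (l0 : List String) : Bool :=
  if l0 = [] then false else
  let a := PySem.Chars.lower (answer.getD "").toList
  let cons := l0.map (fun m => PySem.Chars.lower m.toList)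
  pvScan a cons (DOWNSTREAM_CAPABILITY_MARKERS.map String.toList) (List.range (a.length + 1))

-- ===== PRECONDITION & SPEC =====
def Spec_detect_downstream_before_constraint (prompt : String) (answer : Option String) (l0 : List String) (out : Bool) : Prop := out = detect_downstream_before_constraint_alt prompt answer l0
instance (prompt : String) (answer : Option String) (l0 : List String) (out : Bool) : Decidable (Spec_detect_downstream_before_constraint prompt answer l0 out) := by unfold Spec_detect_downstream_before_constraint; infer_instance

-- ===== CLAIM (what is proved, stated in full; the proofs are below) =====
def Claim_equal_detect_downstream_before_constraint : Prop := ∀ (prompt : String) (answer : Option String) (l0 : List String), Dom_detect_downstream_before_constraint prompt answer l0 → Spec_detect_downstream_before_constraint prompt answer l0 (detect_downstream_before_constraint prompt answer l0)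

-- ===== LEMMAS AND PROOFS =====

-- some marker of ms starts at position i of a
def OccP (a : List Char) (ms : List (List Char)) (i : Nat) : Prop := ∃ m ∈ ms, m <+: a.drop i

theorem pvKeepMin_def (first idx : Int) :
    pvKeepMin first idx = if idx ≠ -1 ∧ (first = -1 ∨ idx < first) then idx else first := by
  simp [pvKeepMin]

theorem occ_any (a : List Char) (ms : List (List Char)) (i : Nat) :
    (ms.any (fun m => pvStartsAt a m i) = true) ↔ OccP a ms i := by
  simp [pvStartsAt, OccP, List.any_eq_true]

theorem foldl_keepMin (vs : List Int) (acc : Int) (hacc : -1 ≤ acc) (hvs : ∀ v ∈ vs, -1 ≤ v) :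
    (-1 ≤ vs.foldl pvKeepMin acc) ∧
    (vs.foldl pvKeepMin acc = -1 → acc = -1 ∧ ∀ v ∈ vs, v = -1) ∧
    (vs.foldl pvKeepMin acc ≠ -1 →
      (vs.foldl pvKeepMin acc = acc ∨ vs.foldl pvKeepMin acc ∈ vs) ∧
      (acc = -1 ∨ vs.foldl pvKeepMin acc ≤ acc) ∧
      (∀ v ∈ vs, v = -1 ∨ vs.foldl pvKeepMin acc ≤ v)) := by
  induction vs generalizing acc with
  | nil => simpa using hacc
  | cons v vs ih =>
    have hv : -1 ≤ v := hvs v (by simp)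
    have hvs' : ∀ w ∈ vs, -1 ≤ w := fun w hw => hvs w (by simp [hw])
    rw [List.foldl_cons, pvKeepMin_def]
    split_ifs with h
    · obtain ⟨ihge, ihneg, ihpos⟩ := ih v (by omega) hvs'
      refine ⟨ihge, fun hF => absurd (ihneg hF).1 h.1, fun hF => ?_⟩
      obtain ⟨hmem, hle, hall⟩ := ihpos hF
      have hFv : List.foldl pvKeepMin v vs ≤ v := by
        rcases hle with h'' | h''
        · exact absurd h'' h.1
        · exact h''
      refine ⟨?_, ?_, ?_⟩
      · rcases hmem with h' | h' <;> simp [h']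
      · rcases h.2 with h' | h'
        · exact Or.inl h'
        · exact Or.inr (by omega)
      · intro w hw
        rcases List.mem_cons.mp hw with rfl | hw'
        · exact Or.inr hFv
        · exact hall w hw'
    · obtain ⟨ihge, ihneg, ihpos⟩ := ih acc hacc hvs'
      refine ⟨ihge, ?_, ?_⟩
      · intro hF
        obtain ⟨he, hall⟩ := ihneg hF
        refine ⟨he, fun w hw => ?_⟩
        rcases List.mem_cons.mp hw with rfl | hw'
        · by_contra hv1
          exact h ⟨hv1, Or.inl he⟩
        · exact hall w hw'
      · intro hF
        obtain ⟨hmem, hle, hall⟩ := ihpos hF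
        refine ⟨?_, hle, ?_⟩
        · rcases hmem with h' | h'
          · exact Or.inl h'
          · exact Or.inr (List.mem_cons_of_mem _ h')
        · intro w hw
          rcases List.mem_cons.mp hw with rfl | hw'
          · by_cases hv1 : w = -1
            · exact Or.inl hv1
            · have hnc : ¬ (acc = -1 ∨ w < acc) := fun h' => h ⟨hv1, h'⟩
              have hwacc : ¬ w < acc := fun hlt => hnc (Or.inr hlt)
              rcases hle with hA | hA
              · exact absurd (Or.inl hA) hnc
              · exact Or.inr (by omega)
          · exact hall w hw'

theorem fold_occ (a : List Char) (ms : List (List Char)) :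
    ((ms.map (PySem.Chars.find a)).foldl pvKeepMin (-1) = -1 → ∀ i, ¬ OccP a ms i) ∧
    ((ms.map (PySem.Chars.find a)).foldl pvKeepMin (-1) ≠ -1 →
      0 ≤ (ms.map (PySem.Chars.find a)).foldl pvKeepMin (-1) ∧
      ((ms.map (PySem.Chars.find a)).foldl pvKeepMin (-1)).toNat ≤ a.length ∧
      OccP a ms ((ms.map (PySem.Chars.find a)).foldl pvKeepMin (-1)).toNat ∧
      ∀ j < ((ms.map (PySem.Chars.find a)).foldl pvKeepMin (-1)).toNat, ¬ OccP a ms j) := by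
  set F := (ms.map (PySem.Chars.find a)).foldl pvKeepMin (-1) with hFdef
  have hvs : ∀ v ∈ ms.map (PySem.Chars.find a), -1 ≤ v := by
    intro v hv
    obtain ⟨m, _, rfl⟩ := List.mem_map.mp hv
    exact PySem.Chars.neg_one_le_find a m
  obtain ⟨hge, hneg, hpos⟩ := foldl_keepMin (ms.map (PySem.Chars.find a)) (-1) (by omega) hvs
  constructor
  · intro hF i ⟨m, hm, hpre⟩
    have hfind : PySem.Chars.find a m = -1 :=
      (hneg hF).2 _ (List.mem_map.mpr ⟨m, hm, rfl⟩)
    have : ¬ m <:+: a := (PySem.Chars.find_eq_neg_one_iff a m).mp hfind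
    exact this ((PySem.Chars.isIn_iff_infix m a).mp
      ((PySem.Chars.exists_prefix_drop_iff_isIn m a).mp ⟨i, hpre⟩))
  · intro hF
    obtain ⟨hmem, -, hall⟩ := hpos hF
    have h0 : 0 ≤ F := by omega
    rcases hmem with h' | h'
    · omega
    obtain ⟨m, hm, hfm⟩ := List.mem_map.mp h'
    have hfm0 : 0 ≤ PySem.Chars.find a m := by omega
    obtain ⟨hpre, hmin⟩ := PySem.Chars.find_spec (s := a) (sub := m) hfm0
    have hlen : PySem.Chars.find a m ≤ a.length := PySem.Chars.find_le_length a m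
    refine ⟨h0, by omega, ⟨m, hm, by rw [hFdef, ← hfm]; exact hpre⟩, ?_⟩
    intro j hj ⟨m', hm', hpre'⟩
    have hin : PySem.Chars.isIn m' a = true :=
      (PySem.Chars.exists_prefix_drop_iff_isIn m' a).mp ⟨j, hpre'⟩
    have hne : PySem.Chars.find a m' ≠ -1 := by
      rw [PySem.Chars.find_ne_neg_one_iff]
      exact (PySem.Chars.isIn_iff_infix m' a).mp hin
    have h0' : 0 ≤ PySem.Chars.find a m' := by
      have := PySem.Chars.neg_one_le_find a m'; omega
    obtain ⟨-, hmin'⟩ := PySem.Chars.find_spec (s := a) (sub := m') h0'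
    have hle' : (PySem.Chars.find a m').toNat ≤ j := by
      by_contra hc
      exact hmin' j (by omega) hpre'
    have hFle : F ≤ PySem.Chars.find a m' := by
      rcases hall _ (List.mem_map.mpr ⟨m', hm', rfl⟩) with h'' | h''
      · omega
      · rw [hFdef]; exact h''
    omega

theorem pvScan_eq (a : List Char) (cons caps : List (List Char)) (is : List Nat) :
    pvScan a cons caps is =
      match is.find? (fun i => cons.any (fun m => pvStartsAt a m i)
                           || caps.any (fun m => pvStartsAt a m i)) with
      | none => false
      | some i => ! cons.any (fun m => pvStartsAt a m i) := by
  induction is with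
  | nil => simp [pvScan]
  | cons i rest ih =>
    by_cases hc : cons.any (fun m => pvStartsAt a m i) = true
    · simp [pvScan, hc, List.find?_cons_of_pos]
    · by_cases hk : caps.any (fun m => pvStartsAt a m i) = true
      · simp [pvScan, hc, hk, List.find?_cons_of_pos]
      · have hp : (cons.any (fun m => pvStartsAt a m i)
                   || caps.any (fun m => pvStartsAt a m i)) = false := by
          rw [Bool.or_eq_false_iff]
          exact ⟨Bool.eq_false_iff.mpr hc, Bool.eq_false_iff.mpr hk⟩
        simp [pvScan, hc, hk, List.find?_cons_of_neg, hp, ih]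

theorem find?_range_eq_some (p : Nat → Bool) (N m0 : Nat) (h1 : m0 < N) (h2 : p m0 = true)
    (h3 : ∀ j < m0, p j = false) : (List.range N).find? p = some m0 := by
  induction N with
  | zero => omega
  | succ n ih =>
    rw [List.range_succ, List.find?_append]
    by_cases hm : m0 < n
    · rw [ih hm]; rfl
    · have hm0 : m0 = n := by omega
      have hnone : (List.range n).find? p = none := by
        rw [List.find?_eq_none]
        intro j hj
        simp only [List.mem_range] at hj
        simp [h3 j (by omega)]
      rw [hnone, hm0.symm]
      simp [h2]

-- ===== VERDICT (by name: the statement is the Claim_ definition above) =====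
theorem detect_downstream_before_constraint_spec : Claim_equal_detect_downstream_before_constraint := by
  intro prompt answer l0 _
  unfold Spec_detect_downstream_before_constraint
  unfold detect_downstream_before_constraint detect_downstream_before_constraint_alt
  by_cases hl0 : l0 = []
  · simp [hl0]
  simp only [hl0, if_false]
  set a := PySem.Chars.lower (answer.getD "").toList with ha
  set capsL : List (List Char) := DOWNSTREAM_CAPABILITY_MARKERS.map String.toList with hcapsL
  set consL : List (List Char) := l0.map (fun m => PySem.Chars.lower m.toList) with hconsL
  have hfoldcap : DOWNSTREAM_CAPABILITY_MARKERS.foldl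
      (fun first m => pvKeepMin first (PySem.Chars.find a m.toList)) (-1)
      = (capsL.map (PySem.Chars.find a)).foldl pvKeepMin (-1) := by
    rw [hcapsL, List.map_map, List.foldl_map]
    rfl
  have hfoldcon : l0.foldl
      (fun first m => pvKeepMin first (PySem.Chars.find a (PySem.Chars.lower m.toList))) (-1)
      = (consL.map (PySem.Chars.find a)).foldl pvKeepMin (-1) := by
    rw [hconsL, List.map_map, List.foldl_map]
    rfl
  rw [hfoldcap, hfoldcon]
  set Fc := (capsL.map (PySem.Chars.find a)).foldl pvKeepMin (-1) with hFc
  set Fk := (consL.map (PySem.Chars.find a)).foldl pvKeepMin (-1) with hFk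
  rw [pvScan_eq]
  set p : Nat → Bool := fun i => consL.any (fun m => pvStartsAt a m i)
                             || capsL.any (fun m => pvStartsAt a m i) with hp
  obtain ⟨hcapneg, hcappos⟩ := fold_occ a capsL
  obtain ⟨hconneg, hconpos⟩ := fold_occ a consL
  by_cases hc : Fc = -1
  · -- no capability marker anywhere: A returns false; any scan hit is a constraint hit
    simp only [hc, if_pos]
    rcases hfind : (List.range (a.length + 1)).find? p with _ | i
    · rfl
    · have hpi := List.find?_some hfind
      have hkno : ¬ capsL.any (fun m => pvStartsAt a m i) = true := by
        rw [occ_any]; exact hcapneg hc i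
      have hki : consL.any (fun m => pvStartsAt a m i) = true := by
        rw [hp] at hpi
        rcases Bool.or_eq_true_iff.mp hpi with h | h
        · exact h
        · exact absurd h hkno
      simp [hki]
  · obtain ⟨hc0, hclen, hcocc, hcmin⟩ := hcappos hc
    simp only [if_neg hc]
    by_cases hk : Fk = -1
    · -- no constraint marker anywhere: A returns true; first scan hit is the capability at Fc.toNat
      have hnocon : ∀ i, ¬ OccP a consL i := hconneg hk
      have hfind : (List.range (a.length + 1)).find? p = some Fc.toNat := by
        refine find?_range_eq_some p _ _ (by omega) ?_ ?_
        · rw [hp]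
          simp only [Bool.or_eq_true]
          right; rw [occ_any]; exact hcocc
        · intro j hj
          rw [hp, Bool.or_eq_false_iff]
          refine ⟨Bool.eq_false_iff.mpr ?_, Bool.eq_false_iff.mpr ?_⟩
          · simp only [ne_eq, occ_any]; exact hnocon j
          · simp only [ne_eq, occ_any]; exact hcmin j hj
      rw [hfind]
      have : ¬ consL.any (fun m => pvStartsAt a m Fc.toNat) = true := by
        rw [occ_any]; exact hnocon _
      simp [hk, this]
    · obtain ⟨hk0, hklen, hkocc, hkmin⟩ := hconpos hk
      simp only [if_neg hk]
      set m0 := min Fc.toNat Fk.toNat with hm0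
      have hpm0 : p m0 = true := by
        rw [hp]
        simp only [Bool.or_eq_true]
        rcases le_total Fc.toNat Fk.toNat with h | h
        · right; rw [occ_any]
          have : m0 = Fc.toNat := by omega
          rw [this]; exact hcocc
        · left; rw [occ_any]
          have : m0 = Fk.toNat := by omega
          rw [this]; exact hkocc
      have hfind : (List.range (a.length + 1)).find? p = some m0 := by
        refine find?_range_eq_some p _ _ (by omega) hpm0 ?_
        intro j hj
        rw [hp, Bool.or_eq_false_iff]
        refine ⟨Bool.eq_false_iff.mpr ?_, Bool.eq_false_iff.mpr ?_⟩
        · simp only [ne_eq, occ_any]; exact hkmin j (by omega)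
        · simp only [ne_eq, occ_any]; exact hcmin j (by omega)
      rw [hfind]
      by_cases hlt : Fc < Fk
      · have hm0c : m0 = Fc.toNat := by omega
        have : ¬ consL.any (fun m => pvStartsAt a m m0) = true := by
          rw [occ_any, hm0c]; exact hkmin _ (by omega)
        simp [this, hlt]
      · have hm0k : m0 = Fk.toNat := by omega
        have : consL.any (fun m => pvStartsAt a m m0) = true := by
          rw [occ_any, hm0k]; exact hkocc
        simp [this, hlt]
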